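-- pv_equiv track=rewrite | github.com/joetainment/t33d | code/maya/t33d_maya_and_jupyter_lab_connector/maya_jupyter/kernel.py | _parse_exception
-- ===== SOURCE A (Python) =====
-- def _parse_exception(tb_text: str) -> tuple:
--     """
--     Extract the exception class name and message from a formatted traceback.
--
--     Python tracebacks end with a line like:
--         ValueError: the message here
--     or just:
--         StopIteration
--
--     We walk backwards through the lines looking for the first non-indented,
--     non-'Traceback' line, which is the exception summary.
--
--     Returns
--     -------
--     tuple[str, str]
--         (ename, evalue) suitable for Jupyter's 'error' message format.
--         Falls back to ('Error', tb_text) if nothing parseable is found.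
--     """
--     for line in reversed(tb_text.splitlines()):
--         line = line.strip()
--         if not line:
--             continue
--         if line.startswith('Traceback'):
--             continue
--         # Lines that start with spaces are part of the stack frames — skip.
--         # The exception summary line is flush left.
--         if line[0] == ' ':
--             continue
--         if ': ' in line:
--             parts = line.split(': ', 1)
--             return parts[0].strip(), parts[1].strip()
--         return line, ''
--     return 'Error', tb_text
-- ===== SOURCE B (Python) =====
-- def _parse_exception(tb_text: str) -> tuple:
--     """Single forward pass with a running answer: start from the fallback,
--     parse every summary candidate as it is seen, let the last overwrite win."""
--     ename, evalue = 'Error', tb_text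
--     for raw in tb_text.splitlines():
--         line = raw.strip()
--         if line and not line.startswith('Traceback'):
--             if ': ' in line:
--                 left, right = line.split(': ', 1)
--                 ename, evalue = left.strip(), right.strip()
--             else:
--                 ename, evalue = line, ''
--     return ename, evalue
-- ===== Notes on version B (the rewrite author's own statement) =====
-- stated objective: alternative
-- what changed: Replaces A's backward scan with early returns by a single forward pass that keeps a running (ename, evalue) answer initialized to the fallback, parses every candidate summary line eagerly (strip, drop empties and 'Traceback' lines, split on ': ') and lets the last overwrite win; A's dead flush-left space check disappears.
import Mathlib
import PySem

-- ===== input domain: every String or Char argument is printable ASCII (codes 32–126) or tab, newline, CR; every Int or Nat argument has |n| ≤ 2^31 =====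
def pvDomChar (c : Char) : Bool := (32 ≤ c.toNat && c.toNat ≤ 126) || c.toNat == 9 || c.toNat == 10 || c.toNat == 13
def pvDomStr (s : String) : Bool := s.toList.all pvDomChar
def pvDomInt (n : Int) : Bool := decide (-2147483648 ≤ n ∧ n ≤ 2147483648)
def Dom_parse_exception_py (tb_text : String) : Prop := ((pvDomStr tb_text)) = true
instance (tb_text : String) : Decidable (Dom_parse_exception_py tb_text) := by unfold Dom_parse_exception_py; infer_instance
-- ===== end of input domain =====

-- B replaces A's backward early-return scan by a forward pass with a running parsed answer (objective: alternative; B parses every candidate, A only the last).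


-- ===== PORT A =====
-- the ': '-split-and-return step of A's summary-line branch
def pvFinishA (line : String) : String × String :=
  let parts := (PySem.Str.splitMax? line ": " 1).getD []
  (PySem.Str.strip (PySem.List.pyGetD parts 0 ""), PySem.Str.strip (PySem.List.pyGetD parts 1 ""))

-- A's backward for-loop with early returns, as recursion over the reversed line list
def pvGoA (tb_text : String) : List String → String × String
  | [] => ("Error", tb_text)
  | l :: rest =>
    let line := PySem.Str.strip l
    if line = "" then pvGoA tb_text rest
    else if PySem.Str.startswith line "Traceback" then pvGoA tb_text rest
    else if PySem.Str.pyGet? line 0 = some ' ' then pvGoA tb_text rest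
    else if PySem.Str.isIn ": " line then pvFinishA line
    else (line, "")

def parse_exception_py (tb_text : String) : String × String :=
  pvGoA tb_text (PySem.Str.splitlines tb_text).reverse

-- ===== PORT B =====
-- one iteration of B's forward loop: overwrite the running answer when the line is a candidate
def pvStep (acc : String × String) (raw : String) : String × String :=
  let line := PySem.Str.strip raw
  if line ≠ "" ∧ ¬ (PySem.Str.startswith line "Traceback" = true) then
    if PySem.Str.isIn ": " line then
      let parts := (PySem.Str.splitMax? line ": " 1).getD []
      (PySem.Str.strip (PySem.List.pyGetD parts 0 ""), PySem.Str.strip (PySem.List.pyGetD parts 1 ""))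
    else (line, "")
  else acc

def parse_exception_py_alt (tb_text : String) : String × String :=
  (PySem.Str.splitlines tb_text).foldl pvStep ("Error", tb_text)

-- ===== PRECONDITION & SPEC =====
def Spec_parse_exception_py (tb_text : String) (out : String × String) : Prop := out = parse_exception_py_alt tb_text
instance (tb_text : String) (out : String × String) : Decidable (Spec_parse_exception_py tb_text out) := by unfold Spec_parse_exception_py; infer_instance

-- ===== CLAIM (what is proved, stated in full; the proofs are below) =====
def Claim_equal_parse_exception_py : Prop := ∀ (tb_text : String), Dom_parse_exception_py tb_text → Spec_parse_exception_py tb_text (parse_exception_py tb_text)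

-- ===== LEMMAS AND PROOFS =====

-- "candidate line" predicate both loops agree on (proof-only helper)
def pvKeep (s : String) : Bool := !(s == "") && !(PySem.Str.startswith s "Traceback")

-- head of a nonempty Python-stripped char list is not whitespace
lemma chars_strip_head (cs : List Char) (x : Char) (xs : List Char)
    (h : PySem.Chars.strip cs = x :: xs) : PySem.Chars.isspace x = false := by
  unfold PySem.Chars.strip PySem.Chars.rstrip PySem.Chars.lstrip at h
  set m := List.dropWhile PySem.Chars.isspace cs with hm
  have hpre : (List.dropWhile PySem.Chars.isspace m.reverse).reverse <+: m := by
    have := List.dropWhile_suffix (l := m.reverse) PySem.Chars.isspace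
    simpa using this.reverse
  rw [h] at hpre
  obtain ⟨t, ht⟩ := hpre
  have heq : List.dropWhile PySem.Chars.isspace cs = x :: (xs ++ t) := by
    rw [← hm]; exact ht.symm
  have hne : List.dropWhile PySem.Chars.isspace cs ≠ [] := by simp [heq]
  have hh := List.head_dropWhile_not PySem.Chars.isspace hne
  simp only [heq, List.head_cons] at hh
  exact hh

-- hence A's flush-left space guard is always false on a nonempty stripped line
lemma strip_head_not_space (s : String) (h : PySem.Str.strip s ≠ "") :
    PySem.Str.pyGet? (PySem.Str.strip s) 0 ≠ some ' ' := by
  rcases hcs : PySem.Chars.strip s.toList with _ | ⟨x, xs⟩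
  · exfalso; apply h
    simp [PySem.Str.strip, hcs]
  · have hx := chars_strip_head s.toList x xs hcs
    simp [PySem.Str.pyGet?, PySem.Str.strip, hcs, PySem.Chars.pyGet?,
      PySem.List.pyGet?, PySem.List.pyIdx?]
    intro hcontr
    subst hcontr
    exact absurd hx (by decide)

-- A's backward scan over ys equals "first kept stripped line of ys, then finish"
lemma goA_eq (tb_text : String) (ys : List String) :
    pvGoA tb_text ys =
      match ((ys.map PySem.Str.strip).filter pvKeep).head? with
      | none => ("Error", tb_text)
      | some line => if PySem.Str.isIn ": " line then pvFinishA line else (line, "") := by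
  induction ys with
  | nil => rfl
  | cons l rest ih =>
    show (if PySem.Str.strip l = "" then pvGoA tb_text rest
    else if PySem.Str.startswith (PySem.Str.strip l) "Traceback" then pvGoA tb_text rest
    else if PySem.Str.pyGet? (PySem.Str.strip l) 0 = some ' ' then pvGoA tb_text rest
    else if PySem.Str.isIn ": " (PySem.Str.strip l) then pvFinishA (PySem.Str.strip l)
    else (PySem.Str.strip l, "")) = _
    rw [List.map_cons, List.filter_cons]
    by_cases h0 : PySem.Str.strip l = ""
    · rw [if_pos h0]
      have hk : pvKeep (PySem.Str.strip l) = false := by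
        unfold pvKeep; rw [h0]; rfl
      rw [hk]; exact ih
    · rw [if_neg h0]
      by_cases h1 : PySem.Str.startswith (PySem.Str.strip l) "Traceback" = true
      · rw [if_pos h1]
        have hk : pvKeep (PySem.Str.strip l) = false := by
          unfold pvKeep; rw [h1]; simp
        rw [hk]; exact ih
      · rw [if_neg h1, if_neg (strip_head_not_space l h0)]
        have hk : pvKeep (PySem.Str.strip l) = true := by
          unfold pvKeep
          rw [Bool.not_eq_true] at h1
          rw [h1]
          simp [h0]
        rw [hk]
        simp only [if_true, List.head?_cons]

-- B's forward overwrite-fold over ys equals "last kept stripped line of ys, then finish"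
lemma foldl_step_eq (acc : String × String) (ys : List String) :
    ys.foldl pvStep acc =
      match ((ys.map PySem.Str.strip).filter pvKeep).getLast? with
      | none => acc
      | some line => if PySem.Str.isIn ": " line then pvFinishA line else (line, "") := by
  induction ys generalizing acc with
  | nil => rfl
  | cons l rest ih =>
    rw [List.foldl_cons, ih (pvStep acc l), List.map_cons, List.filter_cons]
    by_cases hk : pvKeep (PySem.Str.strip l) = true
    · have hstep : pvStep acc l =
          (if PySem.Str.isIn ": " (PySem.Str.strip l) then pvFinishA (PySem.Str.strip l)
           else (PySem.Str.strip l, "")) := by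
        unfold pvStep pvFinishA
        unfold pvKeep at hk
        simp only [Bool.and_eq_true, Bool.not_eq_true', beq_eq_false_iff_ne] at hk
        rw [if_pos ⟨hk.1, by rw [hk.2]; exact Bool.false_ne_true⟩]
      rw [hk, if_pos rfl]
      cases hrest : ((rest.map PySem.Str.strip).filter pvKeep).getLast? with
      | none =>
        have : (rest.map PySem.Str.strip).filter pvKeep = [] := by
          simpa using hrest
        simp [List.getLast?_cons, this, hstep]
      | some line =>
        have hlast : (PySem.Str.strip l :: (rest.map PySem.Str.strip).filter pvKeep).getLast?
            = some line := by
          rw [List.getLast?_cons, hrest]; rfl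
        rw [hlast]
    · have hstep : pvStep acc l = acc := by
        unfold pvStep
        unfold pvKeep at hk
        simp only [Bool.and_eq_true, Bool.not_eq_true', beq_eq_false_iff_ne,
          not_and, Bool.not_eq_false] at hk
        by_cases h0 : PySem.Str.strip l = ""
        · rw [if_neg]; intro hc; exact hc.1 h0
        · rw [if_neg]; intro hc; exact hc.2 (hk h0)
      rw [Bool.not_eq_true] at hk
      rw [hk, hstep, if_neg (by exact Bool.false_ne_true)]

-- ===== VERDICT (by name: the statement is the Claim_ definition above) =====
theorem parse_exception_py_spec : Claim_equal_parse_exception_py := by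
  intro tb _
  unfold Spec_parse_exception_py parse_exception_py parse_exception_py_alt
  rw [goA_eq, foldl_step_eq]
  rw [List.map_reverse, List.filter_reverse, List.head?_reverse]
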